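-- pv_equiv track=rewrite | github.com/cmartin-cay/AOC2023 | day09.py | find_first_diff
-- ===== SOURCE A (Python) =====
-- def find_first_diff(seq, running_total=0, zeroth=[]):
--     zeroth = [] if not zeroth else zeroth
--     start_idx = 0
--     running_total += seq[0]
--     zeroth.append(seq[-1])
--     if seq[0] - seq[start_idx + 1] == 0:
--         zeroth.append(0)
--         return zeroth[::-1]
--     else:
--         seq = [(seq[i] - seq[i + 1]) for i in range(len(seq) - 1)]
--         return find_first_diff(seq, running_total=running_total, zeroth=zeroth)
-- ===== SOURCE B (Python) =====
-- # Iterative re-implementation: builds the result front-to-back (no final reversal of the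
-- # collected lasts), diffs via zip.  Return-value equivalent to A; unlike A it does not
-- # mutate a caller-supplied non-empty `zeroth` list.
-- def find_first_diff(seq, running_total=0, zeroth=[]):
--     zeroth = [] if not zeroth else zeroth
--     out = []
--     while seq[0] != seq[1]:
--         out = [seq[-1]] + out
--         running_total += seq[0]
--         seq = [x - y for x, y in zip(seq, seq[1:])]
--     return [0, seq[-1]] + out + zeroth[::-1]
-- ===== Notes on version B (the rewrite author's own statement) =====
-- stated objective: simpler
-- what changed: Replaces tail recursion with accumulator-append-then-reverse by an iterative while loop that prepends each row's last element, building the result front-to-back with no final reversal (zip for the diff row).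
import Mathlib
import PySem

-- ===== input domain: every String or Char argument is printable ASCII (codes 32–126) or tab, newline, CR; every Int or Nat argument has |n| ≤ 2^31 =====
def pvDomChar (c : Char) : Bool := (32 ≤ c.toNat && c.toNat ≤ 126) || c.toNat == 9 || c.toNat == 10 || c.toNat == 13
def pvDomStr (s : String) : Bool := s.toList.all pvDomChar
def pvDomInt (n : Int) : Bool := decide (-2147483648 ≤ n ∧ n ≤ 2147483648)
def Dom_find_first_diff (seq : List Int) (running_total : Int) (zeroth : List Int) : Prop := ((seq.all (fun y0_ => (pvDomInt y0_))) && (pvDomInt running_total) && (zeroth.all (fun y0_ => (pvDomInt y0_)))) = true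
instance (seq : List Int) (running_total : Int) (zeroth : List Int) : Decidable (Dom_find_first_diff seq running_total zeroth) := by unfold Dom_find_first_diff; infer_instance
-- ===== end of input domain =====

-- B replaces A's tail recursion (append then reverse) by an iterative loop building the
-- result front-to-back; equivalence is about the RETURN value only (A mutates a
-- caller-supplied non-empty `zeroth` in place, B does not).

-- ===== PORT A =====
-- `[(seq[i] - seq[i+1]) for i in range(len(seq)-1)]`: every index is in range, so the
-- comprehension is exactly the list of adjacent differences.
def diffsA : List Int → List Int
  | a :: b :: t => (a - b) :: diffsA (b :: t)
  | _ => []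

theorem diffsA_length (l : List Int) : (diffsA l).length = l.length - 1 := by
  match l with
  | [] => simp [diffsA]
  | [a] => simp [diffsA]
  | a :: b :: t => simp [diffsA, diffsA_length (b :: t)]

-- the recursive body of A; `[]`/`[a]` raise IndexError in Python (seq[1] resp. seq[0]),
-- excluded by Pre_, the port returns [] there.
def ffdA : List Int → Int → List Int → List Int
  | [], _, _ => []                 -- seq[0] raises IndexError
  | [_], _, _ => []                -- seq[start_idx + 1] raises IndexError
  | a :: b :: rest, rt, zeroth =>
      let z1 := zeroth ++ [(rest.getLastD b)]          -- zeroth.append(seq[-1])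
      if a - b = 0 then (z1 ++ [0]).reverse            -- zeroth.append(0); return zeroth[::-1]
      else ffdA (diffsA (a :: b :: rest)) (rt + a) z1
  termination_by seq _ _ => seq.length
  decreasing_by simp only [diffsA_length, List.length_cons]; omega

def find_first_diff (seq : List Int) (running_total : Int) (zeroth : List Int) : List Int :=
  -- `zeroth = [] if not zeroth else zeroth` (a value-level identity; it only changes aliasing)
  ffdA seq running_total (if zeroth.isEmpty then [] else zeroth)

-- ===== PORT B =====
-- while seq[0] != seq[1]: out = [seq[-1]] + out; seq = [x - y for x, y in zip(seq, seq[1:])]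
-- followed by the epilogue `[0, seq[-1]] + out` in the exit branch; `_ => []` is the
-- IndexError of `seq[0]`/`seq[1]` on rows shorter than 2 (outside Pre_).
def loopB : List Int → List Int → List Int
  | a :: b :: rest, out =>
      if a = b then 0 :: rest.getLastD b :: out
      else loopB (List.zipWith (fun x y => x - y) (a :: b :: rest) (b :: rest))
                 (rest.getLastD b :: out)
  | _, _ => []
  termination_by seq _ => seq.length
  decreasing_by simp only [List.length_zipWith, List.length_cons]; omega

def find_first_diff_alt (seq : List Int) (running_total : Int) (zeroth : List Int) : List Int :=
  loopB seq [] ++ zeroth.reverse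

-- ===== PRECONDITION & SPEC =====
-- the k-th finite-difference row of the input
def pvDelta (l : List Int) : List Int := List.zipWith (fun x y => x - y) l l.tail

-- Pre_: some iterated finite-difference row of `seq` reachable before the rows run out
-- begins with 0 — the standard termination condition of difference-table extrapolation;
-- everywhere else Python A raises IndexError (seq[1] on a row shorter than 2).
def Pre_find_first_diff (seq : List Int) (running_total : Int) (zeroth : List Int) : Prop :=
  ∃ k ∈ Finset.range (seq.length - 1), (pvDelta^[k + 1] seq).head? = some 0

instance (seq : List Int) (running_total : Int) (zeroth : List Int) : Decidable (Pre_find_first_diff seq running_total zeroth) := by unfold Pre_find_first_diff; infer_instance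

def pvWitness_find_first_diff : List Int × Int × List Int := ([1, 2, 3], 0, [5])

def Spec_find_first_diff (seq : List Int) (running_total : Int) (zeroth : List Int) (out : List Int) : Prop := out = find_first_diff_alt seq running_total zeroth
instance (seq : List Int) (running_total : Int) (zeroth : List Int) (out : List Int) : Decidable (Spec_find_first_diff seq running_total zeroth out) := by unfold Spec_find_first_diff; infer_instance

-- ===== CLAIM (what is proved, stated in full; the proofs are below) =====
def Claim_equal_find_first_diff : Prop := ∀ (seq : List Int) (running_total : Int) (zeroth : List Int), Dom_find_first_diff seq running_total zeroth → Pre_find_first_diff seq running_total zeroth → Spec_find_first_diff seq running_total zeroth (find_first_diff seq running_total zeroth)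

-- ===== LEMMAS AND PROOFS =====

-- Pre_ ignores running_total and zeroth; this is its seq-only core.
def PreSeq (s : List Int) : Prop := ∃ k < s.length - 1, (pvDelta^[k + 1] s).head? = some 0

theorem pre_iff (seq : List Int) (rt : Int) (z : List Int) :
    Pre_find_first_diff seq rt z ↔ PreSeq seq := by
  simp [Pre_find_first_diff, PreSeq, Finset.mem_range]

theorem delta_cons (a b : Int) (rest : List Int) :
    pvDelta (a :: b :: rest) = (a - b) :: pvDelta (b :: rest) := by
  simp [pvDelta]

theorem delta_length (l : List Int) : (pvDelta l).length = l.length - 1 := by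
  cases l <;> simp [pvDelta, List.length_zipWith]

theorem diffsA_eq (l : List Int) : diffsA l = pvDelta l := by
  match l with
  | [] => simp [diffsA, pvDelta]
  | [a] => simp [diffsA, pvDelta]
  | a :: b :: t => rw [diffsA, delta_cons, diffsA_eq (b :: t)]

-- one-step unfolding equations for the two well-founded recursions
theorem loopB_eq (a b : Int) (rest out : List Int) :
    loopB (a :: b :: rest) out =
      if a = b then 0 :: rest.getLastD b :: out
      else loopB (List.zipWith (fun x y => x - y) (a :: b :: rest) (b :: rest))
                 (rest.getLastD b :: out) := by
  rw [loopB.eq_def]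

theorem ffdA_eq_def (a b : Int) (rest : List Int) (rt : Int) (zeroth : List Int) :
    ffdA (a :: b :: rest) rt zeroth =
      (let z1 := zeroth ++ [(rest.getLastD b)]
       if a - b = 0 then (z1 ++ [0]).reverse
       else ffdA (diffsA (a :: b :: rest)) (rt + a) z1) := by
  rw [ffdA.eq_def]

-- PreSeq forces at least two elements.
theorem preSeq_len {s : List Int} (h : PreSeq s) : 2 ≤ s.length := by
  obtain ⟨k, hk, _⟩ := h
  omega

-- stepping the precondition through one non-terminating round
theorem preSeq_step {a b : Int} {rest : List Int} (hne : ¬ a - b = 0)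
    (h : PreSeq (a :: b :: rest)) : PreSeq (pvDelta (a :: b :: rest)) := by
  obtain ⟨k, hk, hz⟩ := h
  match k with
  | 0 =>
      exfalso
      rw [Function.iterate_one, delta_cons] at hz
      simp at hz
      omega
  | k' + 1 =>
      refine ⟨k', ?_, ?_⟩
      · rw [delta_length]; simp at hk ⊢; omega
      · rw [← Function.iterate_succ_apply]; exact hz

-- the accumulator of B's loop is only ever appended to (on terminating inputs)
theorem loopB_acc {s : List Int} (h : PreSeq s) (out : List Int) :
    loopB s out = loopB s [] ++ out := by
  match s with
  | [] => exact absurd (preSeq_len h) (by simp)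
  | [a] => exact absurd (preSeq_len h) (by simp)
  | a :: b :: rest =>
      by_cases hab : a = b
      · simp [loopB_eq, hab]
      · have hstep : PreSeq (pvDelta (a :: b :: rest)) :=
          preSeq_step (by omega) h
        have hd : List.zipWith (fun x y => x - y) (a :: b :: rest) (b :: rest)
            = pvDelta (a :: b :: rest) := by simp [pvDelta]
        rw [loopB_eq, loopB_eq, if_neg hab, if_neg hab, hd,
            loopB_acc hstep (rest.getLastD b :: out),
            loopB_acc hstep [rest.getLastD b]]
        simp
  termination_by s.length
  decreasing_by all_goals simp [delta_length]

-- main lemma: A's recursion equals B's loop followed by the reversed accumulator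
theorem ffdA_eq_loopB {s : List Int} (h : PreSeq s) (rt : Int) (z : List Int) :
    ffdA s rt z = loopB s [] ++ z.reverse := by
  match s with
  | [] => exact absurd (preSeq_len h) (by simp)
  | [a] => exact absurd (preSeq_len h) (by simp)
  | a :: b :: rest =>
      by_cases hab : a - b = 0
      · have hab' : a = b := by omega
        rw [ffdA_eq_def, loopB_eq]
        simp [hab']
      · have hab' : ¬ a = b := by omega
        have hstep : PreSeq (pvDelta (a :: b :: rest)) := preSeq_step hab h
        have hd : List.zipWith (fun x y => x - y) (a :: b :: rest) (b :: rest)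
            = pvDelta (a :: b :: rest) := by simp [pvDelta]
        rw [ffdA_eq_def, loopB_eq]
        simp only [hab, hab', ite_false]
        rw [diffsA_eq, ffdA_eq_loopB hstep (rt + a) (z ++ [rest.getLastD b]), hd,
            loopB_acc hstep [rest.getLastD b]]
        simp
  termination_by s.length
  decreasing_by simp [delta_length]

-- ===== VERDICT (by name: the statement is the Claim_ definition above) =====
theorem find_first_diff_spec : Claim_equal_find_first_diff := by
  intro seq rt z _ hpre
  have hp : PreSeq seq := (pre_iff seq rt z).mp hpre
  unfold Spec_find_first_diff find_first_diff find_first_diff_alt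
  by_cases hz : z.isEmpty
  · have : z = [] := by simpa using hz
    subst this
    simpa using ffdA_eq_loopB hp rt []
  · rw [if_neg hz]
    exact ffdA_eq_loopB hp rt z
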